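-- pv_equiv track=rewrite | github.com/Zaddylike/Testing_Robot | NLH/NLH_robot_v0.py | convert_cards_to_readable
-- ===== SOURCE A (Python) =====
-- def convert_cards_to_readable(card_numbers):
--     def get_card_info(num):
--         # 方塊 2-A: 2-14
--         if 2 <= num <= 14:
--             rank = num if num <= 10 else {11: 'J', 12: 'Q', 13: 'K', 14: 'A'}[num]
--             return '♦', str(rank)
--         # 梅花 2-A: 18-30
--         elif 18 <= num <= 30:
--             rank = num - 16 if num <= 26 else {27: 'J', 28: 'Q', 29: 'K', 30: 'A'}[num]
--             return '♣', str(rank)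
--         # 紅心 2-A: 34-46
--         elif 34 <= num <= 46:
--             rank = num - 32 if num <= 42 else {43: 'J', 44: 'Q', 45: 'K', 46: 'A'}[num]
--             return '♥', str(rank)
--         # 黑桃 2-A: 50-62
--         elif 50 <= num <= 62:
--             rank = num - 48 if num <= 58 else {59: 'J', 60: 'Q', 61: 'K', 62: 'A'}[num]
--             return '♠', str(rank)
--         else:
--             return '?', str(num)
--
--     readable_cards = []
--     for card in card_numbers:
--         suit, rank = get_card_info(card)
--         readable_cards.append(f"{suit}_{rank}")
--
--     return readable_cards
-- ===== SOURCE B (Python) =====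
-- SUITS = ['♦', '♣', '♥', '♠']
--
-- def convert_cards_to_readable(card_numbers):
--     readable_cards = []
--     for num in card_numbers:
--         suit_index = (num - 2) // 16
--         value = num - 16 * suit_index
--         if 0 <= suit_index <= 3 and 2 <= value <= 14:
--             rank = str(value) if value <= 10 else 'JQKA'[value - 11]
--             readable_cards.append(f"{SUITS[suit_index]}_{rank}")
--         else:
--             readable_cards.append(f"?_{num}")
--     return readable_cards
-- ===== Notes on version B (the rewrite author's own statement) =====
-- stated objective: simpler
-- what changed: Replaces A's four cascaded per-suit range branches (each with its own face-card dict) by one arithmetic decomposition: suit_index = (num-2)//16 and value = num-16*suit_index, with a single suit table and a single 'JQKA' rank lookup.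
import Mathlib
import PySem

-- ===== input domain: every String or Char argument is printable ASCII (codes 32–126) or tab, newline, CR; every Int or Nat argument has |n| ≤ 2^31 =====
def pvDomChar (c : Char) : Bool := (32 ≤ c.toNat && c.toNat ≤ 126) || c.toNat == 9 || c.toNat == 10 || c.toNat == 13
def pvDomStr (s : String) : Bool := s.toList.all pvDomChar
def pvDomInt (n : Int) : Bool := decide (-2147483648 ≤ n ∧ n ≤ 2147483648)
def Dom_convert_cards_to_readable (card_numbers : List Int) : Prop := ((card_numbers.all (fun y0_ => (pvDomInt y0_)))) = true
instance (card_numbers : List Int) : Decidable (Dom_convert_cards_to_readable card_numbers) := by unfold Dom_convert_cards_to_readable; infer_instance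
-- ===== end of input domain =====

-- B replaces A's four cascaded range branches by one arithmetic decomposition
-- (suit index = (num-2)//16, value = num - 16*suit_index) with table lookups; objective: simpler.

-- ===== PORT A =====
-- A's inner helper: four cascaded range checks, dict lookup for face cards.
def getCardInfo (num : Int) : String × String :=
  if 2 ≤ num ∧ num ≤ 14 then
    ("♦", if num ≤ 10 then PySem.Int.toStr num
          else if num = 11 then "J" else if num = 12 then "Q" else if num = 13 then "K" else "A")
  else if 18 ≤ num ∧ num ≤ 30 then
    ("♣", if num ≤ 26 then PySem.Int.toStr (num - 16)
          else if num = 27 then "J" else if num = 28 then "Q" else if num = 29 then "K" else "A")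
  else if 34 ≤ num ∧ num ≤ 46 then
    ("♥", if num ≤ 42 then PySem.Int.toStr (num - 32)
          else if num = 43 then "J" else if num = 44 then "Q" else if num = 45 then "K" else "A")
  else if 50 ≤ num ∧ num ≤ 62 then
    ("♠", if num ≤ 58 then PySem.Int.toStr (num - 48)
          else if num = 59 then "J" else if num = 60 then "Q" else if num = 61 then "K" else "A")
  else ("?", PySem.Int.toStr num)

def convert_cards_to_readable (card_numbers : List Int) : List String :=
  card_numbers.foldl (fun acc card =>
    let si := getCardInfo card
    acc ++ [si.1 ++ "_" ++ si.2]) []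

-- ===== PORT B =====
def altSuits : List String := ["♦", "♣", "♥", "♠"]

def altCardStr (num : Int) : String :=
  let si := PySem.Int.floordiv (num - 2) 16
  let value := num - 16 * si
  if 0 ≤ si ∧ si ≤ 3 ∧ 2 ≤ value ∧ value ≤ 14 then
    -- both indexings are in range under the guard, so getD's default is unreachable
    let rank := if value ≤ 10 then PySem.Int.toStr value
                else String.ofList [(PySem.Str.pyGet? "JQKA" (value - 11)).getD ' ']
    (PySem.List.pyGet? altSuits si).getD "" ++ "_" ++ rank
  else "?_" ++ PySem.Int.toStr num

def convert_cards_to_readable_alt (card_numbers : List Int) : List String :=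
  card_numbers.foldl (fun acc num => acc ++ [altCardStr num]) []

-- ===== PRECONDITION & SPEC =====
def Spec_convert_cards_to_readable (card_numbers : List Int) (out : List String) : Prop := out = convert_cards_to_readable_alt card_numbers
instance (card_numbers : List Int) (out : List String) : Decidable (Spec_convert_cards_to_readable card_numbers out) := by unfold Spec_convert_cards_to_readable; infer_instance

-- ===== CLAIM (what is proved, stated in full; the proofs are below) =====
def Claim_equal_convert_cards_to_readable : Prop := ∀ (card_numbers : List Int), Dom_convert_cards_to_readable card_numbers → Spec_convert_cards_to_readable card_numbers (convert_cards_to_readable card_numbers)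

-- ===== LEMMAS AND PROOFS =====

lemma qmark_append (s : String) : "?" ++ "_" ++ s = "?_" ++ s := rfl

lemma card_eq (n : Int) : (getCardInfo n).1 ++ "_" ++ (getCardInfo n).2 = altCardStr n := by
  have hd : PySem.Int.floordiv (n - 2) 16 = (n - 2) / 16 :=
    PySem.Int.floordiv_eq_ediv_of_pos (by norm_num)
  by_cases h1 : 2 ≤ n ∧ n ≤ 14
  · have hq : (n - 2) / 16 = 0 := by omega
    by_cases hn : n ≤ 10
    · simp [getCardInfo, altCardStr, hq, h1, hn, altSuits]
    · have : n = 11 ∨ n = 12 ∨ n = 13 ∨ n = 14 := by omega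
      rcases this with h | h | h | h <;> subst h <;> decide
  · by_cases h2 : 18 ≤ n ∧ n ≤ 30
    · have hq : (n - 2) / 16 = 1 := by omega
      by_cases hn : n ≤ 26
      · simp [getCardInfo, altCardStr, hq, h1, h2, hn, altSuits]; omega
      · have : n = 27 ∨ n = 28 ∨ n = 29 ∨ n = 30 := by omega
        rcases this with h | h | h | h <;> subst h <;> decide
    · by_cases h3 : 34 ≤ n ∧ n ≤ 46
      · have hq : (n - 2) / 16 = 2 := by omega
        by_cases hn : n ≤ 42
        · simp [getCardInfo, altCardStr, hq, h1, h2, h3, hn, altSuits]; omega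
        · have : n = 43 ∨ n = 44 ∨ n = 45 ∨ n = 46 := by omega
          rcases this with h | h | h | h <;> subst h <;> decide
      · by_cases h4 : 50 ≤ n ∧ n ≤ 62
        · have hq : (n - 2) / 16 = 3 := by omega
          by_cases hn : n ≤ 58
          · simp [getCardInfo, altCardStr, hq, h1, h2, h3, h4, hn, altSuits]; omega
          · have : n = 59 ∨ n = 60 ∨ n = 61 ∨ n = 62 := by omega
            rcases this with h | h | h | h <;> subst h <;> decide
        · have hg : ¬ (0 ≤ (n - 2) / 16 ∧ (n - 2) / 16 ≤ 3 ∧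
              2 ≤ n - 16 * ((n - 2) / 16) ∧ n - 16 * ((n - 2) / 16) ≤ 14) := by omega
          simp only [getCardInfo, altCardStr, hd,
            if_neg h1, if_neg h2, if_neg h3, if_neg h4, if_neg hg]
          exact qmark_append _

-- ===== VERDICT (by name: the statement is the Claim_ definition above) =====
theorem convert_cards_to_readable_spec : Claim_equal_convert_cards_to_readable := by
  intro card_numbers _
  unfold Spec_convert_cards_to_readable
  unfold convert_cards_to_readable convert_cards_to_readable_alt
  rw [PySem.List.foldl_append_singleton_eq_map, PySem.List.foldl_append_singleton_eq_map]
  exact List.map_congr_left (fun n _ => card_eq n)
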